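-- pv_equiv track=rewrite | github.com/CptBalistico/Rosalind | Scripts/rna_splicing.py | excise_introns
-- ===== SOURCE A (Python) =====
-- def excise_introns(sequence: str, introns: list) -> str:
--     """
--     Excise intronic subs sequences from the main DNA sequence
--
--     :param sequence: str,  main sequence
--     :param introns: list, to be excised intronic sequences
--     :return: str, DNA sequences without intronic sequences
--     """
--
--     intron_cords = []
--     for intron in introns:
--         for i in range(len(sequence)):
--             if intron == sequence[i:i + len(intron)]:
--                 intron_cords.append((i, i + len(intron)))
--
--     intron_cords = sorted(intron_cords)
--
--     exons = []
--     for pos, cords in enumerate(intron_cords):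
--         if pos == 0:
--             exons.append(sequence[:cords[0]])
--         else:
--             exons.append(sequence[intron_cords[pos - 1][1]:cords[0]])
--     exons.append(sequence[intron_cords[-1][1]:])
--     return ''.join(exons)
-- ===== SOURCE B (Python) =====
-- def excise_introns(sequence: str, introns: list) -> str:
--     """
--     Excise intronic subsequences from the main DNA sequence.
--
--     Single fused left-to-right scan: introns are pre-sorted by length once, so
--     at each position the matching occurrences appear already in the global
--     (start, end) order; each match immediately emits the pending exon gap and
--     advances the cursor.  No occurrence list is materialised and no interval
--     sort is performed.
--     """
--     by_len = sorted(introns, key=len)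
--     prev = 0
--     pieces = []
--     for i in range(len(sequence)):
--         for intron in by_len:
--             if sequence.startswith(intron, i):
--                 pieces.append(sequence[prev:i])
--                 prev = i + len(intron)
--     pieces.append(sequence[prev:])
--     return ''.join(pieces)
-- ===== Notes on version B (the rewrite author's own statement) =====
-- stated objective: alternative
-- what changed: B performs one fused left-to-right scan of the sequence: introns are pre-sorted by length once so matches at each position already appear in global (start, end) order, and every match immediately emits the pending exon gap and advances a cursor - no occurrence-interval list is materialised and no interval sort is performed, unlike A's collect-all-intervals / sort / gap-join staging.
import Mathlib
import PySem

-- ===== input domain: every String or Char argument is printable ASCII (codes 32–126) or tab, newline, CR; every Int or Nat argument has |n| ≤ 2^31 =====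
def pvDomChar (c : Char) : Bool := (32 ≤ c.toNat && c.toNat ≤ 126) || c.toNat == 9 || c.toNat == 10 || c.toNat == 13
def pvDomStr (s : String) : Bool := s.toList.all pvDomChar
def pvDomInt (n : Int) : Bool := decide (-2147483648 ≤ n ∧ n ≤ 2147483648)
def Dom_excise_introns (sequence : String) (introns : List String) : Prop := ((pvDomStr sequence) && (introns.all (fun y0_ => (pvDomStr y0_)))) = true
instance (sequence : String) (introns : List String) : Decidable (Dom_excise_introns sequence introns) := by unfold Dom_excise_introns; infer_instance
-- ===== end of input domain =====

-- B replaces A's collect-all-intervals/sort/gap-join staging by a single fused left-to-right scan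
-- (introns pre-sorted by length once, matches emit the pending exon gap immediately); objective:
-- alternative structure, same exact result.

-- ===== PORT A =====
-- Literal transliteration of A.  The two pyGetD defaults are never read on inputs admitted by
-- Pre_ (intron_cords[pos-1] has pos ≥ 1, and intron_cords[-1] is Python's IndexError on an empty
-- list, which Pre_ excludes).
def excise_introns (sequence : String) (introns : List String) : String :=
  let intron_cords : List (Int × Int) :=
    introns.foldl (fun acc intron =>
      (PySem.List.pyRange 0 (PySem.Str.len sequence) 1).foldl (fun acc2 i =>
        if intron == PySem.Str.slice sequence (some i) (some (i + PySem.Str.len intron)) then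
          acc2 ++ [(i, i + PySem.Str.len intron)]
        else acc2) acc) []
  let ic := PySem.List.sorted2 intron_cords (fun c => c.1) (fun c => c.2) false
  let exons : List String :=
    (PySem.List.enumerate ic 0).foldl (fun ex pc =>
      if pc.1 == 0 then
        ex ++ [PySem.Str.slice sequence none (some pc.2.1)]
      else
        ex ++ [PySem.Str.slice sequence (some (PySem.List.pyGetD ic (pc.1 - 1) (0, 0)).2) (some pc.2.1)]) []
  let exons := exons ++ [PySem.Str.slice sequence (some (PySem.List.pyGetD ic (-1) (0, 0)).2) none]
  PySem.Str.join "" exons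

-- ===== PORT B =====
-- B-side helper: Python's sequence.startswith(intron, i); exact for 0 ≤ i (Source B only calls it
-- with i drawn from range(len(sequence))).
def pvStartsWithAt (s t : List Char) (i : Int) : Bool := t.isPrefixOf (s.drop i.toNat)

def excise_introns_alt (sequence : String) (introns : List String) : String :=
  let by_len := PySem.List.sorted introns (fun t => PySem.Str.len t)
  let st := (PySem.List.pyRange 0 (PySem.Str.len sequence) 1).foldl
    (fun (st : Int × List String) i =>
      by_len.foldl (fun (st : Int × List String) intron =>
        if pvStartsWithAt sequence.toList intron.toList i then
          (i + PySem.Str.len intron, st.2 ++ [PySem.Str.slice sequence (some st.1) (some i)])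
        else st) st)
    ((0 : Int), ([] : List String))
  PySem.Str.join "" (st.2 ++ [PySem.Str.slice sequence (some st.1) none])

-- ===== PRECONDITION & SPEC =====
-- Pre_ excludes exactly the inputs where A raises IndexError (intron_cords[-1] on an empty list):
-- no intron occurs in the sequence (an empty intron "occurs" at every position of a nonempty sequence).
def Pre_excise_introns (sequence : String) (introns : List String) : Prop :=
  ∃ t ∈ introns, PySem.Str.isIn t sequence = true ∧ (t ≠ "" ∨ sequence ≠ "")
instance (sequence : String) (introns : List String) : Decidable (Pre_excise_introns sequence introns) := by unfold Pre_excise_introns; infer_instance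
def pvWitness_excise_introns : String × List String := ("ACGUACGU", ["CG"])

def Spec_excise_introns (sequence : String) (introns : List String) (out : String) : Prop := out = excise_introns_alt sequence introns
instance (sequence : String) (introns : List String) (out : String) : Decidable (Spec_excise_introns sequence introns out) := by unfold Spec_excise_introns; infer_instance

-- ===== CLAIM (what is proved, stated in full; the proofs are below) =====
def Claim_equal_excise_introns : Prop := ∀ (sequence : String) (introns : List String), Dom_excise_introns sequence introns → Pre_excise_introns sequence introns → Spec_excise_introns sequence introns (excise_introns sequence introns)
-- ===== LEMMAS AND PROOFS =====

-- the lexicographic (start, end) order A's sorted() uses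
def pvLexLe (a b : Int × Int) : Prop := a.1 < b.1 ∨ (a.1 = b.1 ∧ a.2 ≤ b.2)

-- the occurrence interval of intron t at position j
def pvMk (t : String) (j : Nat) : Int × Int := ((j : Int), (j : Int) + (t.toList.length : Int))

-- the interval stream B's fused scan walks: positions ascending, matches at a position in the
-- given intron order
def pvGen (s : List Char) (ts : List String) : List (Int × Int) :=
  (List.range s.length).flatMap (fun j =>
    (ts.filter (fun t => decide (t.toList <+: s.drop j))).map (fun t => pvMk t j))

-- the common shape both programs reduce to: the gaps between consecutive intervals
def pvGaps (seq : String) : Int → List (Int × Int) → List String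
  | _, [] => []
  | prev, c :: tl => PySem.Str.slice seq (some prev) (some c.1) :: pvGaps seq c.2 tl

def pvLastEnd (prev : Int) (l : List (Int × Int)) : Int :=
  match l.getLast? with
  | none => prev
  | some c => c.2

theorem pv_beq_ofList (s : String) (l : List Char) :
    (s == String.ofList l) = decide (s.toList = l) := by
  rw [Bool.beq_eq_decide_eq]
  apply decide_eq_decide.mpr
  constructor
  · intro h; rw [h, String.toList_ofList]
  · intro h
    have : String.ofList s.toList = String.ofList l := by rw [h]
    simpa using this

theorem pv_slice_zero (seq : String) (b : Option Int) :
    PySem.Str.slice seq (some 0) b = PySem.Str.slice seq none b := by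
  simp only [PySem.Str.slice]
  exact congrArg _ (PySem.List.slice_zero_start _ _)

theorem pv_match_iff (seq intron : String) (jj : Nat) :
    (intron == PySem.Str.slice seq (some (jj : Int)) (some ((jj : Int) + (intron.toList.length : Int))))
      = decide (intron.toList <+: seq.toList.drop jj) := by
  simp only [PySem.Str.slice]
  rw [show PySem.Chars.slice seq.toList (some (jj : Int)) (some ((jj : Int) + (intron.toList.length : Int)))
        = List.take intron.toList.length (List.drop jj seq.toList) from
      PySem.List.slice_natCast_add seq.toList jj intron.toList.length]
  rw [pv_beq_ofList]
  apply decide_eq_decide.mpr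
  exact ⟨fun h => List.prefix_iff_eq_take.mpr h, fun h => List.prefix_iff_eq_take.mp h⟩

-- A's inner position scan for one intron collects exactly its occurrence intervals
theorem pv_scanA_eq (seq intron : String) (acc : List (Int × Int)) :
    (PySem.List.pyRange 0 (PySem.Str.len seq) 1).foldl (fun acc2 i =>
        if intron == PySem.Str.slice seq (some i) (some (i + PySem.Str.len intron)) then
          acc2 ++ [(i, i + PySem.Str.len intron)]
        else acc2) acc
      = acc ++ ((List.range seq.toList.length).filter
            (fun jj => decide (intron.toList <+: seq.toList.drop jj))).map (pvMk intron) := by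
  rw [PySem.Str.len_eq seq, PySem.List.pyRange_zero_natCast, List.foldl_map]
  rw [PySem.Str.len_eq intron]
  rw [PySem.List.foldl_append_if
        (fun (jj : Nat) => intron == PySem.Str.slice seq (some (jj : Int)) (some ((jj : Int) + (intron.toList.length : Int))))
        (fun (jj : Nat) => ((jj : Int), (jj : Int) + (intron.toList.length : Int)))]
  have hf : List.filter
        (fun (jj : Nat) => intron == PySem.Str.slice seq (some (jj : Int)) (some ((jj : Int) + (intron.toList.length : Int))))
        (List.range seq.toList.length)
      = List.filter (fun jj => decide (intron.toList <+: seq.toList.drop jj)) (List.range seq.toList.length) :=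
    List.filter_congr (fun x _ => pv_match_iff seq intron x)
  rw [hf]
  rfl

theorem pv_length_pvGaps (seq : String) : ∀ (l : List (Int × Int)) (prev : Int),
    (pvGaps seq prev l).length = l.length := by
  intro l
  induction l with
  | nil => intro prev; rfl
  | cons c tl ih => intro prev; simp [pvGaps, ih]

theorem pv_getElem_pvGaps (seq : String) : ∀ (l : List (Int × Int)) (prev : Int) (k : Nat)
    (hk : k < (pvGaps seq prev l).length) (hk' : k < l.length) (hk'' : k - 1 < l.length),
    (pvGaps seq prev l)[k]
      = PySem.Str.slice seq (some (if k = 0 then prev else (l[k-1]'hk'').2)) (some (l[k]'hk').1) := by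
  intro l
  induction l with
  | nil => intro prev k hk hk' hk''; exact absurd hk' (by simp)
  | cons c tl ih =>
    intro prev k hk hk' hk''
    match k with
    | 0 => simp [pvGaps]
    | Nat.succ k' =>
      simp only [pvGaps, List.getElem_cons_succ]
      rw [ih c.2 k' (by simpa [pvGaps, pv_length_pvGaps] using hk) (by simpa using hk')
            (by simp at hk' ⊢; omega)]
      match k' with
      | 0 => simp
      | Nat.succ k'' => simp

-- the shared gap-accumulating fold (B's fused emission replayed over an interval list)
theorem pv_foldB_eq (seq : String) : ∀ (l : List (Int × Int)) (prev : Int) (acc : List String),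
    l.foldl (fun (st : Int × List String) c =>
        (c.2, st.2 ++ [PySem.Str.slice seq (some st.1) (some c.1)])) (prev, acc)
      = (pvLastEnd prev l, acc ++ pvGaps seq prev l) := by
  intro l
  induction l with
  | nil => intro prev acc; simp [pvGaps, pvLastEnd]
  | cons c tl ih =>
    intro prev acc
    have hle : pvLastEnd prev (c :: tl) = pvLastEnd c.2 tl := by
      cases tl with
      | nil => simp [pvLastEnd]
      | cons h t =>
        simp only [pvLastEnd, List.getLast?_cons_cons]
        cases e : (h :: t).getLast? with
        | none => exact absurd e (by simp)
        | some x => rfl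
    simp only [List.foldl_cons]
    rw [ih c.2 (acc ++ [PySem.Str.slice seq (some prev) (some c.1)]), hle]
    simp [pvGaps]

theorem pv_pyGetD_natsub (ic : List (Int × Int)) (k : Nat) (hk : 1 ≤ k) (hlt : k - 1 < ic.length) :
    PySem.List.pyGetD ic ((k : Int) - 1) (0, 0) = ic[k-1]'hlt := by
  rw [show ((k : Int) - 1) = ((k - 1 : Nat) : Int) by omega, PySem.List.pyGetD_natCast]
  exact List.getD_eq_getElem ic (0,0) hlt

theorem pv_exonsA_eq (seq : String) (ic : List (Int × Int)) :
    (PySem.List.enumerate ic 0).foldl (fun ex pc =>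
        if pc.1 == 0 then
          ex ++ [PySem.Str.slice seq none (some pc.2.1)]
        else
          ex ++ [PySem.Str.slice seq (some (PySem.List.pyGetD ic (pc.1 - 1) (0, 0)).2) (some pc.2.1)]) []
      = pvGaps seq 0 ic := by
  have hstep : (PySem.List.enumerate ic 0).foldl (fun ex pc =>
        if pc.1 == 0 then
          ex ++ [PySem.Str.slice seq none (some pc.2.1)]
        else
          ex ++ [PySem.Str.slice seq (some (PySem.List.pyGetD ic (pc.1 - 1) (0, 0)).2) (some pc.2.1)]) []
      = (PySem.List.enumerate ic 0).foldl (fun ex pc =>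
          ex ++ [if pc.1 == 0 then PySem.Str.slice seq none (some pc.2.1)
                 else PySem.Str.slice seq (some (PySem.List.pyGetD ic (pc.1 - 1) (0, 0)).2) (some pc.2.1)]) [] := by
    apply PySem.List.foldl_congr_mem
    intro acc pc _
    by_cases h : pc.1 == 0 <;> simp [h]
  rw [hstep, PySem.List.foldl_append_singleton_eq_map, List.nil_append]
  apply List.ext_getElem
  · simp [PySem.List.length_enumerate, pv_length_pvGaps]
  · intro k hk1 hk2
    have hklt : k < ic.length := by simpa [pv_length_pvGaps] using hk2
    have hk1' : k - 1 < ic.length := by omega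
    rw [List.getElem_map]
    rw [PySem.List.getElem_enumerate ic 0 k (by simpa [PySem.List.length_enumerate] using hklt)]
    rw [pv_getElem_pvGaps seq ic 0 k hk2 hklt hk1']
    match k with
    | 0 => simp; exact (pv_slice_zero seq _).symm
    | Nat.succ k' =>
      have hne : ¬ ((0 : Int) + ((k' + 1 : Nat) : Int) == 0) = true := by simp; omega
      rw [if_neg hne]
      rw [show (0 : Int) + ((k' + 1 : Nat) : Int) - 1 = (((k' + 1 : Nat) : Int)) - 1 by ring]
      rw [pv_pyGetD_natsub ic (k' + 1) (by omega) hk1']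
      simp

theorem pv_pyGetD_neg_one {α : Type} (l : List α) (d : α) :
    PySem.List.pyGetD l (-1) d = l.getLastD d := by
  rcases l with _ | ⟨a, tl⟩
  · simp [PySem.List.pyGetD, PySem.List.pyGet?, PySem.List.pyIdx?]
  · simp only [PySem.List.pyGetD, PySem.List.pyGet?, PySem.List.pyIdx?]
    norm_num
    rw [List.getLast?_eq_getElem?]
    simp

theorem pv_lastEnd_eq (l : List (Int × Int)) :
    pvLastEnd 0 l = (l.getLastD (0, 0)).2 := by
  simp only [pvLastEnd, List.getLastD_eq_getLast?]
  cases l.getLast? <;> simp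

-- a conditional fold is the plain fold over the filtered, mapped list
theorem pv_foldl_if_filter_map {α β σ : Type} (p : α → Bool) (g : α → β) (f : σ → β → σ) :
    ∀ (l : List α) (st : σ),
    l.foldl (fun st x => if p x then f st (g x) else st) st = ((l.filter p).map g).foldl f st := by
  intro l
  induction l with
  | nil => intro st; rfl
  | cons a l ih =>
    intro st
    by_cases h : p a <;> simp [h, ih]

-- B's nested scan is the gap fold over the interval stream pvGen
theorem pv_B_fold_eq (seq : String) (ts : List String) :
    (PySem.List.pyRange 0 (PySem.Str.len seq) 1).foldl
      (fun (st : Int × List String) i =>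
        ts.foldl (fun (st : Int × List String) intron =>
          if pvStartsWithAt seq.toList intron.toList i then
            (i + PySem.Str.len intron, st.2 ++ [PySem.Str.slice seq (some st.1) (some i)])
          else st) st)
      ((0 : Int), ([] : List String))
    = (pvGen seq.toList ts).foldl (fun (st : Int × List String) c =>
        (c.2, st.2 ++ [PySem.Str.slice seq (some st.1) (some c.1)])) ((0 : Int), []) := by
  rw [PySem.Str.len_eq seq, PySem.List.pyRange_zero_natCast, List.foldl_map]
  rw [pvGen, List.foldl_flatMap]
  apply PySem.List.foldl_congr_mem
  intro st j _
  rw [← pv_foldl_if_filter_map (fun t => decide (t.toList <+: seq.toList.drop j))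
        (fun t => pvMk t j)
        (fun (st : Int × List String) c => (c.2, st.2 ++ [PySem.Str.slice seq (some st.1) (some c.1)]))]
  apply PySem.List.foldl_congr_mem
  intro st' t _
  simp [pvStartsWithAt, List.isPrefixOf_iff_prefix, pvMk, PySem.Str.len_eq]

theorem pv_filter_map_eq_filterMap {α β : Type} (p : α → Bool) (g : α → β) :
    ∀ (l : List α), (l.filter p).map g
      = l.filterMap (fun x => if p x then some (g x) else none) := by
  intro l
  induction l with
  | nil => rfl
  | cons a l ih => by_cases h : p a <;> simp [h, ih]

theorem pv_filterMap_cons_toList {α β : Type} (f : α → Option β) (a : α) (l : List α) :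
    List.filterMap f (a :: l) = (f a).toList ++ List.filterMap f l := by
  cases h : f a <;> simp [h]

theorem pv_flatMap_split {α β : Type} (g : α → Option β) (h : α → List β) :
    ∀ (l : List α), (l.flatMap fun b => (g b).toList ++ h b).Perm (l.filterMap g ++ l.flatMap h) := by
  intro l
  induction l with
  | nil => simp
  | cons b l ih =>
    simp only [List.flatMap_cons, pv_filterMap_cons_toList, List.append_assoc]
    exact List.Perm.append_left _
      ((List.Perm.append_left _ ih).trans (List.perm_append_comm_assoc _ _ _))

theorem pv_flatMap_swap {α β γ : Type} (F : α → β → Option γ) :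
    ∀ (l₁ : List α) (l₂ : List β),
    (l₁.flatMap fun a => l₂.filterMap (F a)).Perm (l₂.flatMap fun b => l₁.filterMap fun a => F a b) := by
  intro l₁
  induction l₁ with
  | nil => intro l₂; simp
  | cons a l₁ ih =>
    intro l₂
    simp only [List.flatMap_cons, pv_filterMap_cons_toList]
    exact ((List.Perm.append_left _ (ih l₂)).trans (pv_flatMap_split _ _ l₂).symm)

theorem pv_gen_perm (s : List Char) (ts : List String) :
    (pvGen s ts).Perm (ts.flatMap (fun t =>
      ((List.range s.length).filter (fun j => decide (t.toList <+: s.drop j))).map (pvMk t))) := by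
  unfold pvGen
  simp only [pv_filter_map_eq_filterMap]
  exact pv_flatMap_swap
    (fun (j : Nat) (t : String) => if decide (t.toList <+: s.drop j) then some (pvMk t j) else none)
    (List.range s.length) ts

-- membership/pairwise scaffolding for pvGen
theorem pv_pairwise_flatMap {α β : Type} (R : β → β → Prop) (g : α → List β) :
    ∀ (l : List α), l.Pairwise (fun a b => ∀ x ∈ g a, ∀ y ∈ g b, R x y) →
    (∀ a ∈ l, (g a).Pairwise R) → (l.flatMap g).Pairwise R := by
  intro l
  induction l with
  | nil => intro _ _; simp
  | cons a l ih =>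
    intro h1 h2
    simp only [List.flatMap_cons]
    rw [List.pairwise_append]
    refine ⟨h2 a (by simp), ih h1.of_cons (fun b hb => h2 b (by simp [hb])), ?_⟩
    intro x hx y hy
    obtain ⟨b, hb, hyb⟩ := List.mem_flatMap.mp hy
    exact (List.pairwise_cons.mp h1).1 b hb x hx y hyb

theorem pv_gen_pairwise (s : List Char) (ts : List String)
    (hts : ts.Pairwise (fun a b => a.toList.length ≤ b.toList.length)) :
    (pvGen s ts).Pairwise pvLexLe := by
  apply pv_pairwise_flatMap
  · refine List.pairwise_lt_range.imp ?_
    intro j j' hjj x hx y hy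
    obtain ⟨t, _, rfl⟩ := List.mem_map.mp hx
    obtain ⟨t', _, rfl⟩ := List.mem_map.mp hy
    simp only [pvLexLe, pvMk]
    omega
  · intro j _
    rw [List.pairwise_map]
    refine List.Pairwise.imp ?_ (hts.filter _)
    intro a b hab
    refine Or.inr ⟨rfl, ?_⟩
    show (j : Int) + (a.toList.length : Int) ≤ (j : Int) + (b.toList.length : Int)
    omega

theorem pv_insertBy_pairwise {α : Type} (R : α → α → Prop) (before : α → α → Bool)
    (htrue : ∀ a b, before a b = true → R a b) (hfalse : ∀ a b, before a b = false → R b a)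
    (htrans : ∀ a b c, R a b → R b c → R a c) (x : α) :
    ∀ (l : List α), l.Pairwise R → (PySem.List.insertBy before x l).Pairwise R := by
  intro l
  induction l with
  | nil => intro _; simp [PySem.List.insertBy]
  | cons y ys ih =>
    intro hp
    obtain ⟨hy, hys⟩ := List.pairwise_cons.mp hp
    by_cases h : before x y
    · simp only [PySem.List.insertBy, h, if_true]
      refine List.pairwise_cons.mpr ⟨?_, hp⟩
      intro z hz
      rcases List.mem_cons.mp hz with rfl | hz'
      · exact htrue _ _ h
      · exact htrans _ _ _ (htrue _ _ h) (hy z hz')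
    · simp only [PySem.List.insertBy, h, Bool.false_eq_true, if_false]
      refine List.pairwise_cons.mpr ⟨?_, ih hys⟩
      intro z hz
      rcases (PySem.List.mem_insertBy _ _ _ _).mp hz with rfl | hz'
      · exact hfalse _ _ (by simpa using h)
      · exact hy z hz'

theorem pv_sorted2_pairwise (xs : List (Int × Int)) :
    (PySem.List.sorted2 xs (fun c => c.1) (fun c => c.2) false).Pairwise pvLexLe := by
  simp only [PySem.List.sorted2]
  have H : ∀ (l : List (Int × Int)) (acc : List (Int × Int)), acc.Pairwise pvLexLe →
      (l.foldl (fun acc x => PySem.List.insertBy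
        (fun a b => decide (a.1 < b.1) || (!decide (b.1 < a.1) && decide (a.2 < b.2))) x acc) acc).Pairwise pvLexLe := by
    intro l
    induction l with
    | nil => intro acc h; exact h
    | cons x l ih =>
      intro acc h
      exact ih _ (pv_insertBy_pairwise pvLexLe _
        (by intro a b hb; simp only [Bool.or_eq_true, Bool.and_eq_true, Bool.not_eq_true',
              decide_eq_true_eq, decide_eq_false_iff_not] at hb; unfold pvLexLe; omega)
        (by intro a b hb; simp only [Bool.or_eq_false_iff, Bool.and_eq_false_iff, Bool.not_eq_false',
              decide_eq_true_eq, decide_eq_false_iff_not] at hb; unfold pvLexLe; omega)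
        (by intro a b c h1 h2; unfold pvLexLe at *; omega) x acc h)
  exact H xs [] (by simp)

theorem pv_sorted2_eq (xs ys : List (Int × Int)) (hperm : ys.Perm xs)
    (hpw : ys.Pairwise pvLexLe) :
    PySem.List.sorted2 xs (fun c => c.1) (fun c => c.2) false = ys := by
  refine List.eq_of_perm_of_sorted (le := pvLexLe) ?_ (pv_sorted2_pairwise xs) hpw
    ((PySem.List.sorted2_perm xs _ _ false).trans hperm.symm)
  intro a b _ _ h1 h2
  unfold pvLexLe at h1 h2
  have : a.1 = b.1 ∧ a.2 = b.2 := by omega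
  exact Prod.ext this.1 this.2

-- ===== VERDICT (by name: the statements are the Claim_ definitions above) =====
theorem excise_introns_spec : Claim_equal_excise_introns := by
  intro seq introns _hdom _hpre
  unfold Spec_excise_introns
  simp only [excise_introns, excise_introns_alt]
  have hc : introns.foldl (fun acc intron =>
      (PySem.List.pyRange 0 (PySem.Str.len seq) 1).foldl (fun acc2 i =>
        if intron == PySem.Str.slice seq (some i) (some (i + PySem.Str.len intron)) then
          acc2 ++ [(i, i + PySem.Str.len intron)]
        else acc2) acc) []
    = introns.flatMap (fun t =>
        ((List.range seq.toList.length).filter (fun j => decide (t.toList <+: seq.toList.drop j))).map (pvMk t)) := by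
    rw [PySem.List.foldl_congr_mem _ _
        (fun acc t => acc ++ ((List.range seq.toList.length).filter
          (fun j => decide (t.toList <+: seq.toList.drop j))).map (pvMk t)) _
        (fun acc t _ => pv_scanA_eq seq t acc)]
    exact PySem.List.foldl_append_eq_flatMap _ introns []
  rw [hc]
  have hts : (PySem.List.sorted introns (fun t => PySem.Str.len t)).Pairwise
      (fun a b => a.toList.length ≤ b.toList.length) := by
    refine (PySem.List.sorted_pairwise introns (fun t => PySem.Str.len t)).imp ?_
    intro a b hab
    rw [PySem.Str.len_eq, PySem.Str.len_eq] at hab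
    exact_mod_cast hab
  have hic : PySem.List.sorted2
      (introns.flatMap (fun t =>
        ((List.range seq.toList.length).filter (fun j => decide (t.toList <+: seq.toList.drop j))).map (pvMk t)))
      (fun c => c.1) (fun c => c.2) false
    = pvGen seq.toList (PySem.List.sorted introns (fun t => PySem.Str.len t)) := by
    apply pv_sorted2_eq
    · exact (pv_gen_perm seq.toList _).trans
        (List.Perm.flatMap (PySem.List.sorted_perm introns (fun t => PySem.Str.len t) false)
          (fun a _ => List.Perm.refl _))
    · exact pv_gen_pairwise seq.toList _ hts
  rw [hic]
  rw [pv_exonsA_eq, pv_pyGetD_neg_one]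
  rw [pv_B_fold_eq, pv_foldB_eq, pv_lastEnd_eq]
  simp
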